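-- pv_equiv track=rewrite | github.com/Matvey-Makaro/OaCT | lab rab5/potential_method.py | delete_non_corner_vertices
-- ===== SOURCE A (Python) =====
-- def delete_row_in_B(B: list, row: int) -> list:
--     return [(i, j) for (i, j) in B if i != row]
--
-- def delete_col_in_B(B: list, col: int) -> list:
--     return [(i, j) for (i, j) in B if j != col]
--
-- def delete_non_corner_vertices(B: list, m: int, n: int) -> list:
--     is_deleted = True
--     num_in_row = 0
--     while is_deleted:
--         is_deleted = False
--         for k in range(m):
--             for i, j in B:
--                 if i == k:
--                     num_in_row += 1
--             if num_in_row ==1: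
--                 B = delete_row_in_B(B, k)
--                 is_deleted = True
--             num_in_row = 0
--
--         num_in_col = 0
--         for k in range(n):
--             for i, j in B:
--                 if j == k:
--                     num_in_col += 1
--             if num_in_col == 1:
--                 B = delete_col_in_B(B, k)
--                 is_deleted = True
--             num_in_col = 0
--     return B
-- ===== SOURCE B (Python) =====
-- def delete_non_corner_vertices(B: list, m: int, n: int) -> list:
--     # Batch peeling with count dictionaries: no scan over range(m)/range(n),
--     # each sweep deletes all single-entry rows (then cols) at once.
--     while True:
--         rc = {}
--         for i, j in B:
--             rc[i] = rc.get(i, 0) + 1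
--         rows = {i for i, c in rc.items() if c == 1 and 0 <= i < m}
--         B = [(i, j) for (i, j) in B if i not in rows]
--         cc = {}
--         for i, j in B:
--             cc[j] = cc.get(j, 0) + 1
--         cols = {j for j, c in cc.items() if c == 1 and 0 <= j < n}
--         B = [(i, j) for (i, j) in B if j not in cols]
--         if not rows and not cols:
--             return B
-- ===== Notes on version B (the rewrite author's own statement) =====
-- stated objective: faster
-- what changed: Instead of scanning all of range(m) and range(n) and re-counting B for each candidate index in every while-iteration, B builds one count dictionary per sweep and deletes all single-entry rows (then columns) in one batch filter, repeating until a sweep deletes nothing.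
import Mathlib
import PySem

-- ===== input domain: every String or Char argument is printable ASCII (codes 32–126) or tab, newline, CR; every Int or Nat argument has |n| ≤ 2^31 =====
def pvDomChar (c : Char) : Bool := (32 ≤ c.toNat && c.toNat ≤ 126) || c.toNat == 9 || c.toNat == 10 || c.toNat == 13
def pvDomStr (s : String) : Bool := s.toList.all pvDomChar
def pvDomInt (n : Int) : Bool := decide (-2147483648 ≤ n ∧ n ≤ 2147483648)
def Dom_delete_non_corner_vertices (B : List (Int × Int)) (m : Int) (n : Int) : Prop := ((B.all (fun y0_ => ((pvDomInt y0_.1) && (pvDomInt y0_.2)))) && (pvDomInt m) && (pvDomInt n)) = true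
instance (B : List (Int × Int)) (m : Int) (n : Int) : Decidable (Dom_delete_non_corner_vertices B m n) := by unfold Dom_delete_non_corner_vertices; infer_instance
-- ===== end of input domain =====

-- B replaces A's per-index re-count over range(m)/range(n) by one count dictionary per
-- sweep and batch deletion of all single-entry rows/columns; objective: faster.

-- ===== PORT A =====
def delete_row_in_B (B : List (Int × Int)) (row : Int) : List (Int × Int) :=
  B.filter (fun p => p.1 != row)

def delete_col_in_B (B : List (Int × Int)) (col : Int) : List (Int × Int) :=
  B.filter (fun p => p.2 != col)

-- the 'for k in range(m)' row sweep: count entries in row k, delete the row if the count is 1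
def pvRowPass (ks : List Int) (B : List (Int × Int)) (fl : Bool) : List (Int × Int) × Bool :=
  match ks with
  | [] => (B, fl)
  | k :: ks' =>
    let c := B.foldl (fun acc p => if p.1 == k then acc + 1 else acc) (0 : Int)
    if c == 1 then pvRowPass ks' (delete_row_in_B B k) true
    else pvRowPass ks' B fl

-- the 'for k in range(n)' column sweep
def pvColPass (ks : List Int) (B : List (Int × Int)) (fl : Bool) : List (Int × Int) × Bool :=
  match ks with
  | [] => (B, fl)
  | k :: ks' =>
    let c := B.foldl (fun acc p => if p.2 == k then acc + 1 else acc) (0 : Int)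
    if c == 1 then pvColPass ks' (delete_col_in_B B k) true
    else pvColPass ks' B fl

theorem pvRowPass_len_le (ks : List Int) (B : List (Int × Int)) (fl : Bool) :
    (pvRowPass ks B fl).1.length ≤ B.length := by
  induction ks generalizing B fl with
  | nil => simp [pvRowPass]
  | cons k ks' ih =>
    simp only [pvRowPass]
    split
    · exact le_trans (ih _ _) (List.length_filter_le _ _)
    · exact ih _ _

theorem pvColPass_len_le (ks : List Int) (B : List (Int × Int)) (fl : Bool) :
    (pvColPass ks B fl).1.length ≤ B.length := by
  induction ks generalizing B fl with
  | nil => simp [pvColPass]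
  | cons k ks' ih =>
    simp only [pvColPass]
    split
    · exact le_trans (ih _ _) (List.length_filter_le _ _)
    · exact ih _ _

theorem pvCountFold (B : List (Int × Int)) (q : Int × Int → Bool) (a : Int) :
    B.foldl (fun acc p => if q p then acc + 1 else acc) a = a + (B.countP q : Int) := by
  induction B generalizing a with
  | nil => simp
  | cons p B ih =>
    simp only [List.foldl_cons, List.countP_cons, ih]
    by_cases h : q p = true
    · simp only [h, if_pos]
      push_cast
      ring
    · simp [h]

theorem pvFilter_lt_of_countP_one (B : List (Int × Int)) (q : Int × Int → Bool)
    (h : B.countP q = 1) : (B.filter (fun p => !(q p))).length < B.length := by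
  have hex : ∃ p ∈ B, ¬ ((fun p => !(q p)) p = true) := by
    have : 0 < B.countP q := by omega
    obtain ⟨p, hp, hq⟩ := List.countP_pos_iff.mp this
    exact ⟨p, hp, by simp [hq]⟩
  exact List.length_filter_lt_length_iff_exists.mpr hex

theorem pvRowPass_flag (ks : List Int) (B : List (Int × Int)) (fl : Bool)
    (h : (pvRowPass ks B fl).2 = true) :
    (pvRowPass ks B fl).1.length < B.length ∨ fl = true := by
  induction ks generalizing B fl with
  | nil => right; simpa [pvRowPass] using h
  | cons k ks' ih =>
    by_cases hc : ((B.foldl (fun acc p => if p.1 == k then acc + 1 else acc) (0 : Int)) == 1) = true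
    · left
      have hcnt : B.countP (fun p => p.1 == k) = 1 := by
        have h0 := pvCountFold B (fun p => p.1 == k) 0
        rw [h0] at hc
        simp only [beq_iff_eq] at hc
        omega
      have hdel : (delete_row_in_B B k).length < B.length := by
        have := pvFilter_lt_of_countP_one B (fun p => p.1 == k) hcnt
        simpa [delete_row_in_B, bne] using this
      have hle := pvRowPass_len_le ks' (delete_row_in_B B k) true
      have hred : pvRowPass (k :: ks') B fl = pvRowPass ks' (delete_row_in_B B k) true := by
        simp only [pvRowPass]
        rw [if_pos hc]
      rw [hred]
      exact lt_of_le_of_lt hle hdel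
    · have hred : pvRowPass (k :: ks') B fl = pvRowPass ks' B fl := by
        simp only [pvRowPass]
        rw [if_neg hc]
      rw [hred] at h ⊢
      exact ih B fl h

theorem pvColPass_flag (ks : List Int) (B : List (Int × Int)) (fl : Bool)
    (h : (pvColPass ks B fl).2 = true) :
    (pvColPass ks B fl).1.length < B.length ∨ fl = true := by
  induction ks generalizing B fl with
  | nil => right; simpa [pvColPass] using h
  | cons k ks' ih =>
    by_cases hc : ((B.foldl (fun acc p => if p.2 == k then acc + 1 else acc) (0 : Int)) == 1) = true
    · left
      have hcnt : B.countP (fun p => p.2 == k) = 1 := by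
        have h0 := pvCountFold B (fun p => p.2 == k) 0
        rw [h0] at hc
        simp only [beq_iff_eq] at hc
        omega
      have hdel : (delete_col_in_B B k).length < B.length := by
        have := pvFilter_lt_of_countP_one B (fun p => p.2 == k) hcnt
        simpa [delete_col_in_B, bne] using this
      have hle := pvColPass_len_le ks' (delete_col_in_B B k) true
      have hred : pvColPass (k :: ks') B fl = pvColPass ks' (delete_col_in_B B k) true := by
        simp only [pvColPass]
        rw [if_pos hc]
      rw [hred]
      exact lt_of_le_of_lt hle hdel
    · have hred : pvColPass (k :: ks') B fl = pvColPass ks' B fl := by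
        simp only [pvColPass]
        rw [if_neg hc]
      rw [hred] at h ⊢
      exact ih B fl h

-- while is_deleted: the row sweep, the column sweep, repeat while something was deleted
def pvALoop (B : List (Int × Int)) (m : Int) (n : Int) : List (Int × Int) :=
  let r := pvRowPass (PySem.List.pyRange 0 m 1) B false
  let c := pvColPass (PySem.List.pyRange 0 n 1) r.1 r.2
  if c.2 then pvALoop c.1 m n else c.1
termination_by B.length
decreasing_by
  rcases pvColPass_flag _ _ _ (by assumption) with h | h
  · exact lt_of_lt_of_le h (pvRowPass_len_le _ _ _)
  · rcases pvRowPass_flag _ _ _ h with h' | h'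
    · exact lt_of_le_of_lt (pvColPass_len_le _ _ _) h'
    · simp at h'

def delete_non_corner_vertices (B : List (Int × Int)) (m : Int) (n : Int) : List (Int × Int) :=
  pvALoop B m n

-- ===== PORT B =====
-- one iteration's data: the count dict, the single-entry index set, the batch filter
def pvRowSet (B : List (Int × Int)) (m : Int) : PySem.Set Int :=
  let rc := B.foldl (fun d p => d.modify p.1 (0 : Int) (· + 1)) PySem.Dict.empty
  PySem.Set.ofList
    ((rc.items.filter (fun p => p.2 == 1 && decide (0 ≤ p.1) && decide (p.1 < m))).map (·.1))

def pvColSet (B : List (Int × Int)) (n : Int) : PySem.Set Int :=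
  let cc := B.foldl (fun d p => d.modify p.2 (0 : Int) (· + 1)) PySem.Dict.empty
  PySem.Set.ofList
    ((cc.items.filter (fun p => p.2 == 1 && decide (0 ≤ p.1) && decide (p.1 < n))).map (·.1))

theorem contains_pvRowSet (B : List (Int × Int)) (m x : Int) :
    (PySem.Set.contains (pvRowSet B m) x = true) ↔
      (x ∈ B.map (·.1) ∧ B.countP (fun q => q.1 == x) = 1 ∧ 0 ≤ x ∧ x < m) := by
  have hrc : B.foldl (fun d p => d.modify p.1 (0 : Int) (· + 1)) PySem.Dict.empty
      = PySem.Dict.counter (B.map (·.1)) := by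
    rw [PySem.Dict.counter_eq_foldl, List.foldl_map]
  have hcnt : ∀ y : Int, (B.map (·.1)).count y = B.countP (fun q => q.1 == y) := by
    intro y
    simp [List.count, List.countP_map, Function.comp_def]
  simp only [pvRowSet]
  rw [hrc, PySem.Dict.items_counter, List.filter_map, List.map_map]
  simp only [PySem.Set.contains, List.elem_iff, Function.comp_def, List.map_id',
    List.mem_filter, PySem.Set.mem_ofList, Bool.and_eq_true, beq_iff_eq,
    decide_eq_true_eq, hcnt, Nat.cast_eq_one]
  tauto

theorem contains_pvColSet (B : List (Int × Int)) (n x : Int) :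
    (PySem.Set.contains (pvColSet B n) x = true) ↔
      (x ∈ B.map (·.2) ∧ B.countP (fun q => q.2 == x) = 1 ∧ 0 ≤ x ∧ x < n) := by
  have hrc : B.foldl (fun d p => d.modify p.2 (0 : Int) (· + 1)) PySem.Dict.empty
      = PySem.Dict.counter (B.map (·.2)) := by
    rw [PySem.Dict.counter_eq_foldl, List.foldl_map]
  have hcnt : ∀ y : Int, (B.map (·.2)).count y = B.countP (fun q => q.2 == y) := by
    intro y
    simp [List.count, List.countP_map, Function.comp_def]
  simp only [pvColSet]
  rw [hrc, PySem.Dict.items_counter, List.filter_map, List.map_map]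
  simp only [PySem.Set.contains, List.elem_iff, Function.comp_def, List.map_id',
    List.mem_filter, PySem.Set.mem_ofList, Bool.and_eq_true, beq_iff_eq,
    decide_eq_true_eq, hcnt, Nat.cast_eq_one]
  tauto

theorem pvFilter_lt_of_mem (B : List (Int × Int)) (q : Int × Int → Bool)
    (p : Int × Int) (hp : p ∈ B) (hq : q p = true) :
    (B.filter (fun r => !(q r))).length < B.length :=
  List.length_filter_lt_length_iff_exists.mpr ⟨p, hp, by simp [hq]⟩

theorem pvBStep_lt (B : List (Int × Int)) (m n : Int)
    (h : ¬ (((pvRowSet B m).isEmpty &&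
        (pvColSet (B.filter (fun p => !(PySem.Set.contains (pvRowSet B m) p.1))) n).isEmpty) = true)) :
    ((B.filter (fun p => !(PySem.Set.contains (pvRowSet B m) p.1))).filter
        (fun p => !(PySem.Set.contains
          (pvColSet (B.filter (fun p => !(PySem.Set.contains (pvRowSet B m) p.1))) n) p.2))).length
      < B.length := by
  by_cases hr : (pvRowSet B m).isEmpty = true
  · have hc : ¬ ((pvColSet (B.filter (fun p => !(PySem.Set.contains (pvRowSet B m) p.1))) n).isEmpty = true) := by
      intro hc'; exact h (by rw [hr, hc']; rfl)
    obtain ⟨x, hx⟩ := List.exists_mem_of_ne_nil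
      (pvColSet (B.filter (fun p => !(PySem.Set.contains (pvRowSet B m) p.1))) n)
      (fun h0 => hc (List.isEmpty_iff.mpr h0))
    have hxc : PySem.Set.contains (pvColSet (B.filter (fun p => !(PySem.Set.contains (pvRowSet B m) p.1))) n) x = true := by
      show List.contains (pvColSet (B.filter (fun p => !(PySem.Set.contains (pvRowSet B m) p.1))) n) x = true
      rw [List.contains_eq_mem]
      exact decide_eq_true hx
    obtain ⟨hmem, -⟩ := (contains_pvColSet _ n x).mp hxc
    obtain ⟨p, hp, hpx⟩ := List.mem_map.mp hmem
    have := pvFilter_lt_of_mem _ (fun r => PySem.Set.contains (pvColSet (B.filter (fun p => !(PySem.Set.contains (pvRowSet B m) p.1))) n) r.2) p hp (by simp only [hpx]; exact hxc)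
    calc _ < (B.filter (fun p => !(PySem.Set.contains (pvRowSet B m) p.1))).length := this
      _ ≤ B.length := List.length_filter_le _ _
  · obtain ⟨x, hx⟩ := List.exists_mem_of_ne_nil (pvRowSet B m) (fun h0 => hr (List.isEmpty_iff.mpr h0))
    have hxc : PySem.Set.contains (pvRowSet B m) x = true := by
      show List.contains (pvRowSet B m) x = true
      rw [List.contains_eq_mem]
      exact decide_eq_true hx
    obtain ⟨hmem, -⟩ := (contains_pvRowSet B m x).mp hxc
    obtain ⟨p, hp, hpx⟩ := List.mem_map.mp hmem
    have h1 := pvFilter_lt_of_mem B (fun r => PySem.Set.contains (pvRowSet B m) r.1) p hp (by simp only [hpx]; exact hxc)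
    calc _ ≤ (B.filter (fun p => !(PySem.Set.contains (pvRowSet B m) p.1))).length := List.length_filter_le _ _
      _ < B.length := h1

def pvBStep (B : List (Int × Int)) (m : Int) (n : Int) : List (Int × Int) × Bool :=
  let rows := pvRowSet B m
  let B1 := B.filter (fun p => !(PySem.Set.contains rows p.1))
  let cols := pvColSet B1 n
  let B2 := B1.filter (fun p => !(PySem.Set.contains cols p.2))
  (B2, rows.isEmpty && cols.isEmpty)

theorem pvBStep_lt' (B : List (Int × Int)) (m n : Int)
    (h : ¬ ((pvBStep B m n).2 = true)) : (pvBStep B m n).1.length < B.length := by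
  simp only [pvBStep] at h ⊢
  exact pvBStep_lt B m n h

def pvBLoop (B : List (Int × Int)) (m : Int) (n : Int) : List (Int × Int) :=
  let s := pvBStep B m n
  if s.2 then s.1 else pvBLoop s.1 m n
termination_by B.length
decreasing_by
  exact pvBStep_lt' B m n (by assumption)

def delete_non_corner_vertices_alt (B : List (Int × Int)) (m : Int) (n : Int) : List (Int × Int) :=
  pvBLoop B m n

-- ===== PRECONDITION & SPEC =====
def Spec_delete_non_corner_vertices (B : List (Int × Int)) (m : Int) (n : Int) (out : List (Int × Int)) : Prop := out = delete_non_corner_vertices_alt B m n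
instance (B : List (Int × Int)) (m : Int) (n : Int) (out : List (Int × Int)) : Decidable (Spec_delete_non_corner_vertices B m n out) := by unfold Spec_delete_non_corner_vertices; infer_instance

-- ===== CLAIM (what is proved, stated in full; the proofs are below) =====
def Claim_equal_delete_non_corner_vertices : Prop := ∀ (B : List (Int × Int)) (m : Int) (n : Int), Dom_delete_non_corner_vertices B m n → Spec_delete_non_corner_vertices B m n (delete_non_corner_vertices B m n)

-- ===== LEMMAS AND PROOFS =====


theorem pvDelCountRow (B : List (Int × Int)) (k x : Int) (hxk : x ≠ k) :
    (delete_row_in_B B k).countP (fun q => q.1 == x) = B.countP (fun q => q.1 == x) := by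
  unfold delete_row_in_B
  rw [List.countP_filter]
  apply List.countP_congr
  intro a _
  by_cases ha : a.1 = x
  · simp [ha, bne, hxk]
  · simp [ha]

theorem pvDelCountCol (B : List (Int × Int)) (k x : Int) (hxk : x ≠ k) :
    (delete_col_in_B B k).countP (fun q => q.2 == x) = B.countP (fun q => q.2 == x) := by
  unfold delete_col_in_B
  rw [List.countP_filter]
  apply List.countP_congr
  intro a _
  by_cases ha : a.2 = x
  · simp [ha, bne, hxk]
  · simp [ha]

theorem pvRowPass_eq (ks : List Int) (B : List (Int × Int)) (fl : Bool) (hnd : ks.Nodup) :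
    pvRowPass ks B fl
      = (B.filter (fun p => !(ks.contains p.1 && (B.countP (fun q => q.1 == p.1) == 1))),
         fl || ks.any (fun k => B.countP (fun q => q.1 == k) == 1)) := by
  induction ks generalizing B fl with
  | nil => simp [pvRowPass]
  | cons k ks' ih =>
    have hk : k ∉ ks' := (List.nodup_cons.mp hnd).1
    have hnd' : ks'.Nodup := (List.nodup_cons.mp hnd).2
    by_cases hc : ((B.foldl (fun acc p => if p.1 == k then acc + 1 else acc) (0 : Int)) == 1) = true
    · have hcnt : B.countP (fun q => q.1 == k) = 1 := by
        have h0 := pvCountFold B (fun q => q.1 == k) 0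
        rw [h0] at hc
        simp only [beq_iff_eq] at hc
        omega
      have hred : pvRowPass (k :: ks') B fl = pvRowPass ks' (delete_row_in_B B k) true := by
        simp only [pvRowPass]
        rw [if_pos hc]
      rw [hred, ih _ _ hnd']
      simp only [Prod.mk.injEq]
      constructor
      · rw [show delete_row_in_B B k = B.filter (fun p => p.1 != k) from rfl, List.filter_filter]
        apply List.filter_congr
        intro p hp
        by_cases hpk : p.1 = k
        · simp [hpk, hcnt]
        · have hcc := pvDelCountRow B k p.1 hpk
          rw [show delete_row_in_B B k = B.filter (fun p => p.1 != k) from rfl] at hcc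
          simp [hpk, hcc, List.contains_eq_mem]
      · have : (k :: ks').any (fun k' => B.countP (fun q => q.1 == k') == 1) = true := by
          simp [List.any_cons, hcnt]
        rw [this]
        simp
    · have hcnt : ¬ (B.countP (fun q => q.1 == k) = 1) := by
        have h0 := pvCountFold B (fun q => q.1 == k) 0
        intro hcc
        apply hc
        rw [h0, hcc]
        simp
      have hred : pvRowPass (k :: ks') B fl = pvRowPass ks' B fl := by
        simp only [pvRowPass]
        rw [if_neg hc]
      rw [hred, ih _ _ hnd']
      simp only [Prod.mk.injEq]
      constructor
      · apply List.filter_congr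
        intro p hp
        by_cases hpk : p.1 = k
        · have hks' : ks'.contains p.1 = false := by
            simp [List.contains_eq_mem, hpk, hk]
          simp [hpk, hcnt]
        · simp [hpk, List.contains_eq_mem]
      · have hfb : (B.countP (fun q => q.1 == k) == 1) = false := beq_eq_false_iff_ne.mpr hcnt
        rw [List.any_cons, hfb]
        simp

theorem pvColPass_eq (ks : List Int) (B : List (Int × Int)) (fl : Bool) (hnd : ks.Nodup) :
    pvColPass ks B fl
      = (B.filter (fun p => !(ks.contains p.2 && (B.countP (fun q => q.2 == p.2) == 1))),
         fl || ks.any (fun k => B.countP (fun q => q.2 == k) == 1)) := by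
  induction ks generalizing B fl with
  | nil => simp [pvColPass]
  | cons k ks' ih =>
    have hk : k ∉ ks' := (List.nodup_cons.mp hnd).1
    have hnd' : ks'.Nodup := (List.nodup_cons.mp hnd).2
    by_cases hc : ((B.foldl (fun acc p => if p.2 == k then acc + 1 else acc) (0 : Int)) == 1) = true
    · have hcnt : B.countP (fun q => q.2 == k) = 1 := by
        have h0 := pvCountFold B (fun q => q.2 == k) 0
        rw [h0] at hc
        simp only [beq_iff_eq] at hc
        omega
      have hred : pvColPass (k :: ks') B fl = pvColPass ks' (delete_col_in_B B k) true := by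
        simp only [pvColPass]
        rw [if_pos hc]
      rw [hred, ih _ _ hnd']
      simp only [Prod.mk.injEq]
      constructor
      · rw [show delete_col_in_B B k = B.filter (fun p => p.2 != k) from rfl, List.filter_filter]
        apply List.filter_congr
        intro p hp
        by_cases hpk : p.2 = k
        · simp [hpk, hcnt]
        · have hcc := pvDelCountCol B k p.2 hpk
          rw [show delete_col_in_B B k = B.filter (fun p => p.2 != k) from rfl] at hcc
          simp [hpk, hcc, List.contains_eq_mem]
      · have : (k :: ks').any (fun k' => B.countP (fun q => q.2 == k') == 1) = true := by
          simp [List.any_cons, hcnt]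
        rw [this]
        simp
    · have hcnt : ¬ (B.countP (fun q => q.2 == k) = 1) := by
        have h0 := pvCountFold B (fun q => q.2 == k) 0
        intro hcc
        apply hc
        rw [h0, hcc]
        simp
      have hred : pvColPass (k :: ks') B fl = pvColPass ks' B fl := by
        simp only [pvColPass]
        rw [if_neg hc]
      rw [hred, ih _ _ hnd']
      simp only [Prod.mk.injEq]
      constructor
      · apply List.filter_congr
        intro p hp
        by_cases hpk : p.2 = k
        · have hks' : ks'.contains p.2 = false := by
            simp [List.contains_eq_mem, hpk, hk]
          simp [hpk, hcnt]
        · simp [hpk, List.contains_eq_mem]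
      · have hfb : (B.countP (fun q => q.2 == k) == 1) = false := beq_eq_false_iff_ne.mpr hcnt
        rw [List.any_cons, hfb]
        simp

theorem mem_pvRowSet (B : List (Int × Int)) (m x : Int) :
    x ∈ pvRowSet B m ↔ (x ∈ B.map (·.1) ∧ B.countP (fun q => q.1 == x) = 1 ∧ 0 ≤ x ∧ x < m) := by
  rw [← contains_pvRowSet B m x]
  show _ ↔ List.contains _ _ = true
  simp [List.contains_eq_mem]

theorem mem_pvColSet (B : List (Int × Int)) (n x : Int) :
    x ∈ pvColSet B n ↔ (x ∈ B.map (·.2) ∧ B.countP (fun q => q.2 == x) = 1 ∧ 0 ≤ x ∧ x < n) := by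
  rw [← contains_pvColSet B n x]
  show _ ↔ List.contains _ _ = true
  simp [List.contains_eq_mem]

theorem pvRowFilter_eq (B : List (Int × Int)) (m : Int) :
    B.filter (fun p => !((PySem.List.pyRange 0 m 1).contains p.1 && (B.countP (fun q => q.1 == p.1) == 1)))
      = B.filter (fun p => !(PySem.Set.contains (pvRowSet B m) p.1)) := by
  apply List.filter_congr
  intro p hp
  have hp1 : p.1 ∈ B.map (·.1) := List.mem_map.mpr ⟨p, hp, rfl⟩
  have hmain : ((PySem.List.pyRange 0 m 1).contains p.1 && (B.countP (fun q => q.1 == p.1) == 1))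
      = PySem.Set.contains (pvRowSet B m) p.1 := by
    rw [show PySem.Set.contains (pvRowSet B m) p.1 = List.contains (pvRowSet B m) p.1 from rfl]
    rw [Bool.eq_iff_iff]
    simp only [Bool.and_eq_true, List.contains_eq_mem, decide_eq_true_eq,
      PySem.List.mem_pyRange_one, beq_iff_eq, mem_pvRowSet]
    tauto
  rw [hmain]

theorem pvColFilter_eq (B : List (Int × Int)) (n : Int) :
    B.filter (fun p => !((PySem.List.pyRange 0 n 1).contains p.2 && (B.countP (fun q => q.2 == p.2) == 1)))
      = B.filter (fun p => !(PySem.Set.contains (pvColSet B n) p.2)) := by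
  apply List.filter_congr
  intro p hp
  have hp1 : p.2 ∈ B.map (·.2) := List.mem_map.mpr ⟨p, hp, rfl⟩
  have hmain : ((PySem.List.pyRange 0 n 1).contains p.2 && (B.countP (fun q => q.2 == p.2) == 1))
      = PySem.Set.contains (pvColSet B n) p.2 := by
    rw [show PySem.Set.contains (pvColSet B n) p.2 = List.contains (pvColSet B n) p.2 from rfl]
    rw [Bool.eq_iff_iff]
    simp only [Bool.and_eq_true, List.contains_eq_mem, decide_eq_true_eq,
      PySem.List.mem_pyRange_one, beq_iff_eq, mem_pvColSet]
    tauto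
  rw [hmain]

theorem pvRowFlag_eq (B : List (Int × Int)) (m : Int) :
    (PySem.List.pyRange 0 m 1).any (fun k => B.countP (fun q => q.1 == k) == 1)
      = !(pvRowSet B m).isEmpty := by
  rw [Bool.eq_iff_iff]
  simp only [List.any_eq_true, Bool.not_eq_true', List.isEmpty_eq_false_iff_exists_mem,
    PySem.List.mem_pyRange_one, beq_iff_eq]
  constructor
  · rintro ⟨k, ⟨h0, hm⟩, hcnt⟩
    refine ⟨k, (mem_pvRowSet B m k).mpr ⟨?_, hcnt, h0, hm⟩⟩
    have : 0 < B.countP (fun q => q.1 == k) := by omega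
    obtain ⟨q, hq, hq1⟩ := List.countP_pos_iff.mp this
    exact List.mem_map.mpr ⟨q, hq, by simpa using hq1⟩
  · rintro ⟨k, hk⟩
    obtain ⟨-, hcnt, h0, hm⟩ := (mem_pvRowSet B m k).mp hk
    exact ⟨k, ⟨h0, hm⟩, hcnt⟩

theorem pvColFlag_eq (B : List (Int × Int)) (n : Int) :
    (PySem.List.pyRange 0 n 1).any (fun k => B.countP (fun q => q.2 == k) == 1)
      = !(pvColSet B n).isEmpty := by
  rw [Bool.eq_iff_iff]
  simp only [List.any_eq_true, Bool.not_eq_true', List.isEmpty_eq_false_iff_exists_mem,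
    PySem.List.mem_pyRange_one, beq_iff_eq]
  constructor
  · rintro ⟨k, ⟨h0, hn⟩, hcnt⟩
    refine ⟨k, (mem_pvColSet B n k).mpr ⟨?_, hcnt, h0, hn⟩⟩
    have : 0 < B.countP (fun q => q.2 == k) := by omega
    obtain ⟨q, hq, hq1⟩ := List.countP_pos_iff.mp this
    exact List.mem_map.mpr ⟨q, hq, by simpa using hq1⟩
  · rintro ⟨k, hk⟩
    obtain ⟨-, hcnt, h0, hn⟩ := (mem_pvColSet B n k).mp hk
    exact ⟨k, ⟨h0, hn⟩, hcnt⟩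

theorem pvStep_eq (B : List (Int × Int)) (m n : Int) :
    pvColPass (PySem.List.pyRange 0 n 1) (pvRowPass (PySem.List.pyRange 0 m 1) B false).1
        (pvRowPass (PySem.List.pyRange 0 m 1) B false).2
      = ((pvBStep B m n).1, !(pvBStep B m n).2) := by
  rw [pvRowPass_eq _ _ _ (PySem.List.nodup_pyRange_one 0 m)]
  dsimp only
  rw [pvColPass_eq _ _ _ (PySem.List.nodup_pyRange_one 0 n)]
  rw [pvRowFilter_eq B m]
  rw [pvColFilter_eq _ n, pvRowFlag_eq B m, pvColFlag_eq _ n]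
  simp only [pvBStep, Bool.false_or, Bool.not_and]

theorem pvLoop_eq (N : Nat) (B : List (Int × Int)) (m n : Int) (hlen : B.length < N) :
    pvALoop B m n = pvBLoop B m n := by
  induction N generalizing B with
  | zero => omega
  | succ N ih =>
    rw [pvALoop, pvBLoop]
    rw [pvStep_eq B m n]
    dsimp only
    cases hs : (pvBStep B m n).2 with
    | true => simp
    | false =>
      simp only [Bool.not_false, if_true, if_neg (by simp : ¬ (false = true))]
      exact ih _ (by
        have := pvBStep_lt' B m n (by simp [hs])
        omega)

-- ===== VERDICT (by name: the statement is the Claim_ definition above) =====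
theorem delete_non_corner_vertices_spec : Claim_equal_delete_non_corner_vertices := by
  intro B m n _
  unfold Spec_delete_non_corner_vertices delete_non_corner_vertices delete_non_corner_vertices_alt
  exact pvLoop_eq (B.length + 1) B m n (by omega)
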